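-- pv_equiv track=rewrite | github.com/RYGhub/royalnet | royalnet/utils/formatters.py | andformat
-- ===== SOURCE A (Python) =====
-- import typing
--
-- def andformat(l: typing.Collection[str], middle=", ", final=" and ") -> str:
--     """Convert a iterable (such as a :class:`list`) to a :class:`str` by adding ``final`` between the last two elements and ``middle`` between the others.
--
--     Args:
--         l: the input iterable.
--         middle: the :class:`str` to be added between the middle elements.
--         final: the :class:`str` to be added between the last two elements.
--
--     Returns:
--         The resulting :py:class:`str`.
--
--     Examples:
--         ::
--
--             >>> andformat(["Steffo", "Kappa", "Proto"])
--             "Steffo, Kappa and Proto"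
--
--             >>> andformat(["Viktya", "Sensei", "Cate"], final=" e ")
--             "Viktya, Sensei e Cate"
--
--             >>> andformat(["Paltri", "Spaggia", "Gesù", "Mallllco"], middle="+", final="+")
--             "Paltri+Spaggia+Gesù+Mallllco"
--     """
--     result = ""
--     for index, item in enumerate(l):
--         result += item
--         if index == len(l) - 2:
--             result += final
--         elif index != len(l) - 1:
--             result += middle
--     return result
-- ===== SOURCE B (Python) =====
-- import typing
--
-- def andformat(l: typing.Collection[str], middle=", ", final=" and ") -> str:
--     items = list(l)
--     if len(items) == 0:
--         return ""
--     if len(items) == 1: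
--         return items[0]
--     return middle.join(items[:-1]) + final + items[-1]
-- ===== Notes on version B (the rewrite author's own statement) =====
-- stated objective: simpler
-- what changed: Replaces A's single positional loop (which compares each index against len-1/len-2 to pick a separator) with explicit empty/single-element guards plus a slice decomposition: join all but the last element with middle, then append final and the last element.
import Mathlib
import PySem

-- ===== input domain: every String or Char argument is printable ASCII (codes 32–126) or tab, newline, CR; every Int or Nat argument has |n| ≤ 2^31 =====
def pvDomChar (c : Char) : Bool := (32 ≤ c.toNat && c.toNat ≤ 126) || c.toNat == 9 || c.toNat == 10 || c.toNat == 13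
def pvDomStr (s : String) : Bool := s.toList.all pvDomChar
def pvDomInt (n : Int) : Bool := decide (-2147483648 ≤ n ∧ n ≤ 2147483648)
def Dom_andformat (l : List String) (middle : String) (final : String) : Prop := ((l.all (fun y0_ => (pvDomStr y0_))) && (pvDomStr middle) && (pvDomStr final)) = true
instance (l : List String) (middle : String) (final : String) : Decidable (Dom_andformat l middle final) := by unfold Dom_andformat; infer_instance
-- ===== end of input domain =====

-- B replaces A's positional loop (index compared to len-1/len-2 to pick a separator)
-- with empty/single guards plus middle.join(items[:-1]) + final + items[-1]; objective: simpler.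


-- ===== PORT A =====
def andformat (l : List String) (middle : String) (final : String) : String :=
  (PySem.List.enumerate l 0).foldl
    (fun result p =>
      let result := result ++ p.2
      if p.1 = (l.length : Int) - 2 then result ++ final
      else if p.1 ≠ (l.length : Int) - 1 then result ++ middle
      else result) ""

-- ===== PORT B =====
def andformat_alt (l : List String) (middle : String) (final : String) : String :=
  if l.length = 0 then ""
  else if l.length = 1 then (PySem.List.pyGet? l 0).getD ""
  else PySem.Str.join middle (PySem.List.slice l none (some (-1))) ++ final
         ++ (PySem.List.pyGet? l (-1)).getD ""

-- ===== PRECONDITION & SPEC =====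
def Spec_andformat (l : List String) (middle : String) (final : String) (out : String) : Prop := out = andformat_alt l middle final
instance (l : List String) (middle : String) (final : String) (out : String) : Decidable (Spec_andformat l middle final out) := by unfold Spec_andformat; infer_instance

-- ===== CLAIM (what is proved, stated in full; the proofs are below) =====
def Claim_equal_andformat : Prop := ∀ (l : List String) (middle : String) (final : String), Dom_andformat l middle final → Spec_andformat l middle final (andformat l middle final)

-- ===== LEMMAS AND PROOFS =====

/-- The characters contributed by one enumerated item in A's loop. -/
def sepG (n : Int) (middle final : String) (p : Int × String) : List Char :=
  p.2.toList ++ (if p.1 = n - 2 then final.toList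
                 else if p.1 ≠ n - 1 then middle.toList else [])

theorem fold_toList (n : Int) (middle final : String) (xs : List (Int × String)) (acc : String) :
    ((xs.foldl (fun result p =>
        let result := result ++ p.2
        if p.1 = n - 2 then result ++ final
        else if p.1 ≠ n - 1 then result ++ middle
        else result) acc).toList)
      = acc.toList ++ (xs.map (sepG n middle final)).flatten := by
  induction xs generalizing acc with
  | nil => simp
  | cons p xs ih =>
    simp only [List.foldl_cons, List.map_cons, List.flatten_cons, sepG]
    rw [ih]
    split_ifs <;> simp [String.toList_append, List.append_assoc]

theorem flatten_enumerate (n : Int) (middle final : String) :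
    ∀ (xs : List String) (x y : String) (s : Int), s + ((xs.length : Int) + 2) = n →
    (((PySem.List.enumerate (x :: y :: xs) s).map (sepG n middle final)).flatten)
      = PySem.Chars.join middle.toList ((x :: y :: xs).dropLast.map String.toList)
          ++ final.toList ++ ((x :: y :: xs).getLast (by simp)).toList := by
  intro xs
  induction xs with
  | nil =>
    intro x y s hs
    simp only [PySem.List.enumerate_cons, PySem.List.enumerate_nil, List.map_cons, List.map_nil,
      List.flatten_cons, List.flatten_nil, sepG]
    have hs' : s + 2 = n := by simpa using hs
    have h1 : s = n - 2 := by omega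
    have h2 : ¬ (s + 1 = n - 2) := by omega
    have h3 : s + 1 = n - 1 := by omega
    have h3' : ¬ (s + 1 ≠ n - 1) := by omega
    rw [if_pos h1, if_neg h2, if_neg h3']
    simp [PySem.Chars.join_singleton, List.append_assoc]
  | cons z zs ih =>
    intro x y s hs
    have hs' : s + (zs.length : Int) + 3 = n := by
      simp only [List.length_cons] at hs; push_cast at hs; omega
    have h1 : ¬ (s = n - 2) := by omega
    have h2 : s ≠ n - 1 := by omega
    have hrec := ih y z (s + 1) (by omega)
    simp only [PySem.List.enumerate_cons, List.map_cons, List.flatten_cons] at hrec ⊢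
    rw [hrec]
    have hdl : (x :: y :: z :: zs).dropLast = x :: (y :: z :: zs).dropLast := rfl
    have hjoin : PySem.Chars.join middle.toList ((x :: y :: z :: zs).dropLast.map String.toList)
        = x.toList ++ middle.toList
            ++ PySem.Chars.join middle.toList ((y :: z :: zs).dropLast.map String.toList) := by
      rw [hdl]
      have : (y :: z :: zs).dropLast = y :: (z :: zs).dropLast := rfl
      rw [this]
      simp [PySem.Chars.join_cons_cons]
    rw [hjoin]
    have hg : sepG n middle final (s, x) = x.toList ++ middle.toList := by
      simp [sepG, h1, h2]
    rw [hg]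
    have hlast : (x :: y :: z :: zs).getLast (by simp) = (y :: z :: zs).getLast (by simp) := by
      simp [List.getLast]
    rw [hlast]
    simp [List.append_assoc]

theorem andformat_eq_alt (l : List String) (middle final : String) :
    andformat l middle final = andformat_alt l middle final := by
  apply String.toList_inj.mp
  match l with
  | [] => rfl
  | [x] =>
    simp [andformat, andformat_alt, PySem.List.enumerate_cons, PySem.List.enumerate_nil,
      PySem.List.pyGet?, PySem.List.pyIdx?]
  | x :: y :: xs =>
    rw [andformat, andformat_alt, fold_toList]
    have hflat := flatten_enumerate ((x :: y :: xs).length : Int) middle final xs x y 0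
      (by simp only [List.length_cons]; push_cast; ring)
    rw [hflat]
    have hlen : ¬ ((x :: y :: xs).length = 0) := by simp
    have hlen1 : ¬ ((x :: y :: xs).length = 1) := by simp
    rw [if_neg hlen, if_neg hlen1]
    have hslice : PySem.List.slice (x :: y :: xs) none (some (-1)) = (x :: y :: xs).dropLast :=
      PySem.List.slice_to_neg_one _
    have hget : (PySem.List.pyGet? (x :: y :: xs) (-1)).getD ""
        = (x :: y :: xs).getLast (by simp) := by
      simp [PySem.List.pyGet?, PySem.List.pyIdx?]
      rw [List.getLast_eq_getElem]
      simp
    rw [hslice, hget]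
    simp [String.toList_append, PySem.Str.toList_join, List.append_assoc]

-- ===== VERDICT (by name: the statement is the Claim_ definition above) =====
theorem andformat_spec : Claim_equal_andformat := by
  intro l middle final _
  exact andformat_eq_alt l middle final
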